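-- pv_equiv track=rewrite | github.com/oliwiakaluzinska/prg-basics | mocktest2/p3.py | f
-- ===== SOURCE A (Python) =====
-- def f(array2D):
--     num_columns = len(array2D[0])
--     col_sum = [0] * num_columns
--     row_sum = 0
--     suma = 0
--     for i in array2D:
--         for j in range(num_columns):
--             col_sum[j] += i[j]
--             suma = col_sum[j]
--     for i in array2D:
--         row_sum += sum(i)
--     if suma == row_sum:
--         return True
--     else:
--         return False
-- ===== SOURCE B (Python) =====
-- def f(array2D):
--     num_columns = len(array2D[0])
--     total = 0
--     last = 0
--     for row in array2D:
--         total += sum(row)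
--         if num_columns > 0:
--             last += row[num_columns - 1]
--     return last == total
-- ===== Notes on version B (the rewrite author's own statement) =====
-- stated objective: simpler
-- what changed: Replaces the per-column col_sum table with its inner column loop plus a second full pass for the total by one single pass that accumulates the whole-row sum and the last-column entry directly (A's final suma is just the last column's sum).
import Mathlib
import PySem

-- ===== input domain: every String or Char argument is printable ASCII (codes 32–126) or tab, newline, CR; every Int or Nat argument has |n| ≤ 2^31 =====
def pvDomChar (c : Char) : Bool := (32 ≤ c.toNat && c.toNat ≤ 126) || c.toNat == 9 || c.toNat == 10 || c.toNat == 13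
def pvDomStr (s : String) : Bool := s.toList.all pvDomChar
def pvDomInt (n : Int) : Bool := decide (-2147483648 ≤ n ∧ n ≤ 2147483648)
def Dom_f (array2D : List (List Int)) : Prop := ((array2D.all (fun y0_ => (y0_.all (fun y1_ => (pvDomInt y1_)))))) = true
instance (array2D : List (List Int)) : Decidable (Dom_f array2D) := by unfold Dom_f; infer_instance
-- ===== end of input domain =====

-- B merges A's col_sum table, inner column loop and second full pass into one pass keeping only (total, last-column sum); objective: simpler.

-- ===== PORT A =====
-- inner loop body: col_sum[j] += i[j]; suma = col_sum[j]
def stepA (i : List Int) (st : List Int × Int) (j : Int) : List Int × Int :=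
  let v := PySem.List.pyGetD st.1 j 0 + PySem.List.pyGetD i j 0
  let cs := PySem.List.pySetD st.1 j v
  (cs, PySem.List.pyGetD cs j 0)

-- one iteration of the outer loop: for j in range(num_columns): …
def rowA (numColumns : Int) (st : List Int × Int) (i : List Int) : List Int × Int :=
  (PySem.List.pyRange 0 numColumns 1).foldl (stepA i) st

def f (array2D : List (List Int)) : Bool :=
  let numColumns : Int := ((PySem.List.pyGetD array2D 0 []).length : Int)
  let colSum : List Int := List.replicate numColumns.toNat 0
  let st := array2D.foldl (rowA numColumns) (colSum, 0)
  let rowSum := array2D.foldl (fun acc i => acc + i.sum) 0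
  st.2 == rowSum

-- ===== PORT B =====
def f_alt (array2D : List (List Int)) : Bool :=
  let numColumns : Int := ((PySem.List.pyGetD array2D 0 []).length : Int)
  let st := array2D.foldl (fun (st : Int × Int) row =>
      (st.1 + row.sum,
       if 0 < numColumns then st.2 + PySem.List.pyGetD row (numColumns - 1) 0 else st.2))
      (0, 0)
  st.2 == st.1

-- ===== PRECONDITION & SPEC =====
-- Pre_ excludes exactly the inputs where the Python A raises IndexError: the empty list
-- (array2D[0]) and arrays containing a row shorter than the first row (i[j] out of range).
def Pre_f (array2D : List (List Int)) : Prop :=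
  array2D ≠ [] ∧ ∀ row ∈ array2D, (array2D.headD []).length ≤ row.length
instance (array2D : List (List Int)) : Decidable (Pre_f array2D) := by unfold Pre_f; infer_instance

def pvWitness_f : List (List Int) := [[1, 2], [3, -3]]

def Spec_f (array2D : List (List Int)) (out : Bool) : Prop := out = f_alt array2D
instance (array2D : List (List Int)) (out : Bool) : Decidable (Spec_f array2D out) := by unfold Spec_f; infer_instance

-- ===== CLAIM (what is proved, stated in full; the proofs are below) =====
def Claim_equal_f : Prop := ∀ (array2D : List (List Int)), Dom_f array2D → Pre_f array2D → Spec_f array2D (f array2D)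

-- ===== LEMMAS AND PROOFS =====

-- folding stepA over indices all strictly below t leaves length and the entry at t unchanged
theorem foldl_stepA_lt (t : Nat) : ∀ (js : List Int) (i : List Int) (st : List Int × Int),
    (∀ j ∈ js, 0 ≤ j ∧ j < (t : Int)) →
    ((js.foldl (stepA i) st).1.length = st.1.length ∧
     (js.foldl (stepA i) st).1.getD t 0 = st.1.getD t 0) := by
  intro js
  induction js with
  | nil => intro i st _; exact ⟨rfl, rfl⟩
  | cons j js ih =>
    intro i st h
    obtain ⟨hj0, hjt⟩ := h j (by simp)
    obtain ⟨n, rfl⟩ : ∃ n : Nat, j = (n : Int) := ⟨j.toNat, (Int.toNat_of_nonneg hj0).symm⟩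
    have hrec := ih i (stepA i st (n : Int)) (fun x hx => h x (by simp [hx]))
    have hstep : (stepA i st (n : Int)).1 = st.1.set n
        (PySem.List.pyGetD st.1 (n : Int) 0 + PySem.List.pyGetD i (n : Int) 0) := by
      simp [stepA]
    have hlen : (stepA i st (n : Int)).1.length = st.1.length := by
      rw [hstep]; simp
    have hget : (stepA i st (n : Int)).1.getD t 0 = st.1.getD t 0 := by
      rw [hstep]
      have hne : n ≠ t := by
        have : (n : Int) < (t : Int) := hjt
        omega
      simp [List.getD_eq_getElem?_getD, hne]
    refine ⟨?_, ?_⟩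
    · rw [List.foldl_cons, hrec.1, hlen]
    · rw [List.foldl_cons, hrec.2, hget]

-- one full inner loop over range(nc), nc = t+1 > 0
theorem rowA_spec (t : Nat) (i : List Int) (st : List Int × Int)
    (hl : st.1.length = t + 1) :
    (rowA ((t : Int) + 1) st i).1.length = t + 1 ∧
    (rowA ((t : Int) + 1) st i).2 = st.1.getD t 0 + i.getD t 0 ∧
    (rowA ((t : Int) + 1) st i).1.getD t 0 = (rowA ((t : Int) + 1) st i).2 := by
  have hsplit : PySem.List.pyRange 0 ((t : Int) + 1) 1
      = PySem.List.pyRange 0 (t : Int) 1 ++ [(t : Int)] := by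
    exact PySem.List.pyRange_one_succ_right (by positivity)
  have hmem : ∀ j ∈ PySem.List.pyRange 0 (t : Int) 1, 0 ≤ j ∧ j < (t : Int) := by
    intro j hj
    exact (PySem.List.mem_pyRange_one.mp hj)
  have hpre := foldl_stepA_lt t (PySem.List.pyRange 0 (t : Int) 1) i st hmem
  set st' := (PySem.List.pyRange 0 (t : Int) 1).foldl (stepA i) st with hst'
  have hlen' : st'.1.length = t + 1 := by rw [hpre.1, hl]
  have hgd' : st'.1.getD t 0 = st.1.getD t 0 := hpre.2
  have heval : rowA ((t : Int) + 1) st i = stepA i st' (t : Int) := by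
    unfold rowA
    rw [hsplit, List.foldl_append]
    rfl
  have hlt : t < st'.1.length := by omega
  have hstep : stepA i st' (t : Int)
      = (st'.1.set t (st'.1.getD t 0 + i.getD t 0), st'.1.getD t 0 + i.getD t 0) := by
    simp only [stepA, PySem.List.pyGetD_natCast, PySem.List.pySetD_natCast]
    simp [List.getD_eq_getElem?_getD, hlt]
  rw [heval, hstep]
  refine ⟨by simp [hlen'], by rw [hgd'], ?_⟩
  simp [List.getD_eq_getElem?_getD, hlt]

-- the outer loop of A: suma accumulates the last-column entries
theorem foldl_rowA (t : Nat) : ∀ (a : List (List Int)) (st : List Int × Int),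
    st.1.length = t + 1 → st.2 = st.1.getD t 0 →
    (a.foldl (rowA ((t : Int) + 1)) st).2 = st.2 + (a.map (fun i => i.getD t 0)).sum := by
  intro a
  induction a with
  | nil => intro st hl hs; simp
  | cons i a ih =>
    intro st hl hs
    obtain ⟨h1, h2, h3⟩ := rowA_spec t i st hl
    rw [List.foldl_cons, ih _ h1 h3.symm, h2, hs]
    simp [add_assoc]

-- the single pass of B computes both sums componentwise
theorem foldl_alt (g : List Int → Int) : ∀ (a : List (List Int)) (x y : Int),
    a.foldl (fun (st : Int × Int) row => (st.1 + row.sum, st.2 + g row)) (x, y)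
      = (x + (a.map List.sum).sum, y + (a.map g).sum) := by
  intro a
  induction a with
  | nil => intro x y; simp
  | cons i a ih =>
    intro x y
    rw [List.foldl_cons, ih]
    simp [add_assoc]

-- B's pass when the if-branch is dead (zero columns)
theorem foldl_alt_zero : ∀ (a : List (List Int)) (x y : Int),
    a.foldl (fun (st : Int × Int) row => (st.1 + row.sum, st.2)) (x, y)
      = (x + (a.map List.sum).sum, y) := by
  intro a
  induction a with
  | nil => intro x y; simp
  | cons i a ih =>
    intro x y
    rw [List.foldl_cons, ih]
    simp [add_assoc]

-- A's second pass is the total sum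
theorem foldl_rowSum : ∀ (a : List (List Int)) (x : Int),
    a.foldl (fun acc i => acc + i.sum) x = x + (a.map List.sum).sum := by
  intro a
  induction a with
  | nil => intro x; simp
  | cons i a ih =>
    intro x
    rw [List.foldl_cons, ih]
    simp [add_assoc]

-- ===== VERDICT (by name: the statement is the Claim_ definition above) =====
theorem f_spec : Claim_equal_f := by
  intro a _ _
  unfold Spec_f f f_alt
  rcases hnc : (PySem.List.pyGetD a 0 []).length with _ | t
  · -- zero columns: suma stays 0 on both sides
    simp only [Nat.cast_zero]
    have hr : PySem.List.pyRange 0 (0 : Int) 1 = [] := PySem.List.pyRange_one_eq_nil le_rfl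
    have hrow : rowA (0 : Int) = fun st _ => st := by
      funext st i; unfold rowA; rw [hr]; rfl
    have hA : (a.foldl (rowA (0 : Int)) (List.replicate (0:Int).toNat 0, 0)).2 = 0 := by
      rw [hrow]
      rw [List.foldl_fixed]
    have hif : (fun (st : Int × Int) row =>
        (st.1 + row.sum, if (0:Int) < 0 then st.2 + PySem.List.pyGetD row ((0:Int) - 1) 0 else st.2))
        = fun (st : Int × Int) row => (st.1 + row.sum, st.2) := by
      funext st row; simp
    rw [hA, hif, foldl_alt_zero, foldl_rowSum]
  · -- nc = t+1 > 0
    have hcast : ((t + 1 : Nat) : Int) = (t : Int) + 1 := by push_cast; ring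
    simp only [hcast]
    have htoNat : ((t : Int) + 1).toNat = t + 1 := by omega
    have hA := foldl_rowA t a (List.replicate ((t : Int) + 1).toNat 0, 0)
      (by simp [htoNat]) (by simp)
    rw [hA]
    have hidx : (t : Int) + 1 - 1 = ((t : Nat) : Int) := by ring
    have hif : (fun (st : Int × Int) row =>
        (st.1 + row.sum, if (0:Int) < (t : Int) + 1 then st.2 + PySem.List.pyGetD row ((t : Int) + 1 - 1) 0 else st.2))
        = fun (st : Int × Int) row => (st.1 + row.sum, st.2 + row.getD t 0) := by
      funext st row
      have : (0:Int) < (t : Int) + 1 := by positivity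
      simp [this, hidx]
    rw [hif, foldl_alt (fun row => row.getD t 0), foldl_rowSum]
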